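-- pv_equiv track=rewrite | github.com/theonlyzetto/GSR_GPS_Shimmer | src/data_processing/gsr_gps_core_runner.py | try_pick_by_substring
-- ===== SOURCE A (Python) =====
-- def try_pick_by_substring(columns: list[str], must_contain: list[str]) -> list[str]:
--     out = []
--     cols_lower = [(c, c.lower()) for c in columns]
--     for c, cl in cols_lower:
--         ok = True
--         for m in must_contain:
--             if m.lower() not in cl:
--                 ok = False
--                 break
--         if ok:
--             out.append(c)
--     return out
-- ===== SOURCE B (Python) =====
-- def try_pick_by_substring(columns: list[str], must_contain: list[str]) -> list[str]:
--     candidates = list(columns)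
--     for m in must_contain:
--         ml = m.lower()
--         candidates = [c for c in candidates if ml in c.lower()]
--     return candidates
-- ===== Notes on version B (the rewrite author's own statement) =====
-- stated objective: alternative
-- what changed: Iterates over must_contain in the outer loop, maintaining a shrinking candidate list narrowed by one substring per pass (each lowered once), instead of testing every substring per column in nested loops.
import Mathlib
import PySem

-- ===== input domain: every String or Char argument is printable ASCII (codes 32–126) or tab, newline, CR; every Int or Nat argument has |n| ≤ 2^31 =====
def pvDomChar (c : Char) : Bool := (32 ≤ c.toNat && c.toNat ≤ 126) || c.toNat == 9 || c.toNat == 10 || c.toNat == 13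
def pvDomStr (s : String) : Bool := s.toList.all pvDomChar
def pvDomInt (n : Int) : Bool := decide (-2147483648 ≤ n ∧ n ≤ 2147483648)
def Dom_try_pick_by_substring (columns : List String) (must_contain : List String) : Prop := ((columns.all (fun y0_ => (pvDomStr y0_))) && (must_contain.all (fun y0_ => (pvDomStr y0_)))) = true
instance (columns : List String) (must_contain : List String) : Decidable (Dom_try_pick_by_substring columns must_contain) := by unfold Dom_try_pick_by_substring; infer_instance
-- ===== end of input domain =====

-- B refines a maintained candidate list one required substring at a time (outer loop over must_contain) instead of A's per-column nested check; same asymptotic cost, different decomposition.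


-- ===== PORT A =====
-- inner 'for m in must_contain: if m.lower() not in cl: ok = False; break' as a recursive check
def tpbCheck (cl : String) (ms : List String) : Bool :=
  match ms with
  | [] => true
  | m :: rest =>
      if PySem.Str.isIn (PySem.Str.lower m) cl then tpbCheck cl rest else false

def try_pick_by_substring (columns : List String) (must_contain : List String) : List String :=
  let cols_lower := columns.map (fun c => (c, PySem.Str.lower c))
  cols_lower.foldl (fun out p => if tpbCheck p.2 must_contain then out ++ [p.1] else out) []

-- ===== PORT B =====
-- successive refinement: narrow the candidate list by one required substring per pass
def try_pick_by_substring_alt (columns : List String) (must_contain : List String) : List String :=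
  must_contain.foldl
    (fun cand m =>
      let ml := PySem.Str.lower m
      cand.filter (fun c => PySem.Str.isIn ml (PySem.Str.lower c)))
    columns

-- ===== PRECONDITION & SPEC =====
def Spec_try_pick_by_substring (columns : List String) (must_contain : List String) (out : List String) : Prop := out = try_pick_by_substring_alt columns must_contain
instance (columns : List String) (must_contain : List String) (out : List String) : Decidable (Spec_try_pick_by_substring columns must_contain out) := by unfold Spec_try_pick_by_substring; infer_instance

-- ===== CLAIM (what is proved, stated in full; the proofs are below) =====
def Claim_equal_try_pick_by_substring : Prop := ∀ (columns : List String) (must_contain : List String), Dom_try_pick_by_substring columns must_contain → Spec_try_pick_by_substring columns must_contain (try_pick_by_substring columns must_contain)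

-- ===== LEMMAS AND PROOFS =====

-- ===== VERDICT (by name: the statement is the Claim_ definition above) =====
lemma tpbCheck_eq_all (cl : String) (ms : List String) :
    tpbCheck cl ms = ms.all (fun m => PySem.Str.isIn (PySem.Str.lower m) cl) := by
  induction ms with
  | nil => rfl
  | cons m rest ih => by_cases h : PySem.Str.isIn (PySem.Str.lower m) cl = true <;> simp [tpbCheck, *]

lemma foldl_filter_eq_filter_all (f : String → String → Bool) (ms : List String)
    (cand : List String) :
    ms.foldl (fun cand m => cand.filter (fun c => f m c)) cand
      = cand.filter (fun c => ms.all (fun m => f m c)) := by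
  induction ms generalizing cand with
  | nil => simp
  | cons m rest ih => simp [ih, List.filter_filter, Bool.and_comm]

theorem try_pick_by_substring_spec : Claim_equal_try_pick_by_substring := by
  intro columns must_contain _
  unfold Spec_try_pick_by_substring try_pick_by_substring try_pick_by_substring_alt
  simp only []
  rw [PySem.List.foldl_append_if (fun p : String × String => tpbCheck p.2 must_contain)
      (fun p : String × String => p.1)]
  rw [foldl_filter_eq_filter_all (fun m c => PySem.Str.isIn (PySem.Str.lower m) (PySem.Str.lower c))]
  simp [List.filter_map, List.map_map, tpbCheck_eq_all, Function.comp_def]
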